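-- pv_equiv track=rewrite | github.com/totallyjohnny7/evolution-study-guide | _work/inject_v4.py | js_brace_balance
-- ===== SOURCE A (Python) =====
-- def js_brace_balance(s):
--     """Count braces ignoring string literals."""
--     depth = 0
--     in_str = False
--     sc = None
--     bs = False
--     for c in s:
--         if bs:
--             bs = False
--             continue
--         if in_str:
--             if c == '\\':
--                 bs = True
--                 continue
--             if c == sc:
--                 in_str = False
--         else:
--             if c in "'\"`":
--                 in_str = True
--                 sc = c
--             elif c == '{':
--                 depth += 1
--             elif c == '}':
--                 depth -= 1
--     return depth
-- ===== SOURCE B (Python) =====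
-- def js_brace_balance(s):
--     """Count braces ignoring string literals."""
--     depth = 0
--     i = 0
--     n = len(s)
--     while i < n:
--         c = s[i]
--         if c in "'\"`":
--             i += 1
--             while i < n:
--                 if s[i] == '\\':
--                     i += 2
--                 elif s[i] == c:
--                     i += 1
--                     break
--                 else:
--                     i += 1
--         else:
--             if c == '{':
--                 depth += 1
--             elif c == '}':
--                 depth -= 1
--             i += 1
--     return depth
-- ===== Notes on version B (the rewrite author's own statement) =====
-- stated objective: alternative
-- what changed: Replaced the flag-machine (in_str/sc/bs booleans threaded through one for-loop) by an index-based outer loop with a separate inner loop that consumes a whole string literal (advancing by 2 over escapes) before returning control to the brace counter.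
import Mathlib
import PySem

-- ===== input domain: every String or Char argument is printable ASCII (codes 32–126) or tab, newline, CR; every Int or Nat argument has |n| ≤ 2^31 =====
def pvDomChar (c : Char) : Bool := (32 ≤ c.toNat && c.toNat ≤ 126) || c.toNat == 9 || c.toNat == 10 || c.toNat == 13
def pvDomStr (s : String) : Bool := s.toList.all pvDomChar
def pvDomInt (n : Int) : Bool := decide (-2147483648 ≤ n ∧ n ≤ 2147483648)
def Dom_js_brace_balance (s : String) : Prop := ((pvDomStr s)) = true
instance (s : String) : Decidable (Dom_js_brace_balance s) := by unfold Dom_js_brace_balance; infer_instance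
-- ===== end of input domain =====

-- B replaces A's flag machine by an inner literal-consuming scan; same cost, different decomposition.

-- ===== PORT A =====
-- A's for-loop over the characters with state (depth, in_str, sc, bs), one step per char.
def jsA : List Char → Int → Bool → Option Char → Bool → Int
  | [], depth, _, _, _ => depth
  | c :: rest, depth, in_str, sc, bs =>
    if bs then jsA rest depth in_str sc false
    else if in_str then
      if c = '\\' then jsA rest depth in_str sc true
      else if some c = sc then jsA rest depth false sc bs
      else jsA rest depth in_str sc bs
    else if c = '\'' ∨ c = '"' ∨ c = '`' then jsA rest depth true (some c) bs
    else if c = '{' then jsA rest (depth + 1) in_str sc bs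
    else if c = '}' then jsA rest (depth - 1) in_str sc bs
    else jsA rest depth in_str sc bs

def js_brace_balance (s : String) : Int := jsA s.toList 0 false none false

-- ===== PORT B =====
-- B's inner while-loop: consume a string literal opened by quote q, return the rest
-- (advance by 2 on a backslash, stop one past the closing quote, stop at end of input).
def jsAltIn (q : Char) : List Char → List Char
  | [] => []
  | [_] => []
  | c :: d :: rest =>
    if c = '\\' then jsAltIn q rest
    else if c = q then d :: rest
    else jsAltIn q (d :: rest)

-- termination lemma for the outer loop: the inner scan only moves forward
theorem jsAltIn_length_le (q : Char) : ∀ l : List Char, (jsAltIn q l).length ≤ l.length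
  | [] => by simp [jsAltIn]
  | [c] => by simp [jsAltIn]
  | c :: d :: rest => by
    simp only [jsAltIn]
    split_ifs with h1 h2
    · have := jsAltIn_length_le q rest
      simp at this ⊢; omega
    · simp
    · have := jsAltIn_length_le q (d :: rest)
      simp at this ⊢; omega
termination_by l => l.length

-- B's outer while-loop: count braces, jumping over string literals via jsAltIn.
def jsAlt (depth : Int) (l : List Char) : Int :=
  match l with
  | [] => depth
  | c :: rest =>
    if c = '\'' ∨ c = '"' ∨ c = '`' then jsAlt depth (jsAltIn c rest)
    else if c = '{' then jsAlt (depth + 1) rest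
    else if c = '}' then jsAlt (depth - 1) rest
    else jsAlt depth rest
termination_by l.length
decreasing_by
  · exact Nat.lt_succ_of_le (jsAltIn_length_le _ _)
  · simp
  · simp
  · simp

def js_brace_balance_alt (s : String) : Int := jsAlt 0 s.toList

-- ===== PRECONDITION & SPEC =====
def Spec_js_brace_balance (s : String) (out : Int) : Prop := out = js_brace_balance_alt s
instance (s : String) (out : Int) : Decidable (Spec_js_brace_balance s out) := by unfold Spec_js_brace_balance; infer_instance

-- ===== CLAIM (what is proved, stated in full; the proofs are below) =====
def Claim_equal_js_brace_balance : Prop := ∀ (s : String), Dom_js_brace_balance s → Spec_js_brace_balance s (js_brace_balance s)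

-- ===== LEMMAS AND PROOFS =====

-- The three reachable state shapes of A's machine, each expressed through B's functions.
theorem jsA_main (l : List Char) :
    (∀ (d : Int) (sc : Option Char), jsA l d false sc false = jsAlt d l) ∧
    (∀ (d : Int) (q : Char), jsA l d true (some q) false = jsAlt d (jsAltIn q l)) ∧
    (∀ (d : Int) (q : Char), jsA l d true (some q) true = jsAlt d (jsAltIn q l.tail)) := by
  induction l with
  | nil => simp [jsA, jsAlt, jsAltIn]
  | cons c rest ih =>
    obtain ⟨ihO, ihS, ihB⟩ := ih
    refine ⟨?_, ?_, ?_⟩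
    · intro d sc
      rw [jsAlt]
      by_cases hq : c = '\'' ∨ c = '"' ∨ c = '`'
      · simp only [jsA, Bool.false_eq_true, if_false, if_pos hq]
        exact ihS d c
      · by_cases ho : c = '{'
        · simp only [jsA, Bool.false_eq_true, if_false, if_neg hq, if_pos ho]
          exact ihO (d + 1) sc
        · by_cases hc : c = '}'
          · simp only [jsA, Bool.false_eq_true, if_false, if_neg hq, if_neg ho, if_pos hc]
            exact ihO (d - 1) sc
          · simp only [jsA, Bool.false_eq_true, if_false, if_neg hq, if_neg ho, if_neg hc]
            exact ihO d sc
    · intro d q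
      by_cases hb : c = '\\'
      · have h1 : jsA (c :: rest) d true (some q) false = jsA rest d true (some q) true := by
          simp [jsA, hb]
        have h2 : jsAltIn q (c :: rest) = jsAltIn q rest.tail := by
          cases rest with
          | nil => simp [jsAltIn]
          | cons x rs => simp [jsAltIn, hb]
        rw [h1, h2]
        exact ihB d q
      · by_cases he : c = q
        · have hb' : ¬ q = '\\' := he ▸ hb
          have h1 : jsA (c :: rest) d true (some q) false = jsA rest d false (some q) false := by
            simp [jsA, hb', he]
          have h2 : jsAltIn q (c :: rest) = rest := by
            cases rest with
            | nil => simp [jsAltIn]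
            | cons x rs => simp [jsAltIn, hb', he]
          rw [h1, h2]
          exact ihO d (some q)
        · have h1 : jsA (c :: rest) d true (some q) false = jsA rest d true (some q) false := by
            simp [jsA, hb, he]
          have h2 : jsAltIn q (c :: rest) = jsAltIn q rest := by
            cases rest with
            | nil => simp [jsAltIn]
            | cons x rs => simp [jsAltIn, hb, he]
          rw [h1, h2]
          exact ihS d q
    · intro d q
      have h1 : jsA (c :: rest) d true (some q) true = jsA rest d true (some q) false := by
        simp [jsA]
      rw [h1, List.tail_cons]
      exact ihS d q

-- ===== VERDICT (by name: the statement is the Claim_ definition above) =====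
theorem js_brace_balance_spec : Claim_equal_js_brace_balance := by
  intro s _
  unfold Spec_js_brace_balance js_brace_balance js_brace_balance_alt
  exact (jsA_main s.toList).1 0 none
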